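-- pv_equiv track=rewrite | github.com/sun-hainan/Python | 时序知识图谱/temporal_reasoning.py | temporal_composition_rule
-- ===== SOURCE A (Python) =====
-- from typing import List, Dict, Set, Tuple, Optional, Callable
--
-- def temporal_composition_rule(facts: Set[Tuple]) -> Set[Tuple]:
--     """
--     时序组合规则
--
--     如果 A --[p1]--> B at t 且 B --[p2]--> C at t
--     则 A --[p1∘p2]--> C at t
--     """
--     inferred = set()
--
--     for s1, p1, o1, t1 in facts:
--         for s2, p2, o2, t2 in facts:
--             if o1 == s2 and t1 == t2:
--                 composed = (s1, f"{p1}∘{p2}", o2, t1)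
--                 inferred.add(composed)
--
--     return inferred
-- ===== SOURCE B (Python) =====
-- def temporal_composition_rule(facts):
--     """
--     时序组合规则 — same result as A, computed via a (subject, time) index:
--     one pass builds the index, one pass joins through it (O(n + output)).
--     """
--     index = {}
--     for s2, p2, o2, t2 in facts:
--         index.setdefault((s2, t2), []).append((p2, o2))
--
--     inferred = set()
--     for s1, p1, o1, t1 in facts:
--         for p2, o2 in index.get((o1, t1), []):
--             inferred.add((s1, f"{p1}∘{p2}", o2, t1))
--
--     return inferred
-- ===== Notes on version B (the rewrite author's own statement) =====
-- stated objective: faster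
-- what changed: Replaces the quadratic nested scan over all fact pairs by a dict index keyed on (subject, time), so each fact joins only with its actual matches via a lookup.
import Mathlib
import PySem

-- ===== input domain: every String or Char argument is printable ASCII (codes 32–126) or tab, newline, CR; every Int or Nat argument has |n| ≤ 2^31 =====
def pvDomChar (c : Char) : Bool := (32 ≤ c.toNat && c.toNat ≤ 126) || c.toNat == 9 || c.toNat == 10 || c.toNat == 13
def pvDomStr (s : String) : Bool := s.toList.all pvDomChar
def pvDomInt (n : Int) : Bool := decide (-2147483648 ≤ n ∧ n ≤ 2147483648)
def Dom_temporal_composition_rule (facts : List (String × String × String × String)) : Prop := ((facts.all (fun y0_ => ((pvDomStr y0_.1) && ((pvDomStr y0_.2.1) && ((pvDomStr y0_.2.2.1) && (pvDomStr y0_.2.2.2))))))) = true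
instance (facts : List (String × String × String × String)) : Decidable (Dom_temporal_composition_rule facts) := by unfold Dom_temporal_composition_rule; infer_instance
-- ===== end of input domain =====

-- B builds a dict index keyed on (subject, time) and joins via lookup instead of A's nested pair scan.

-- ===== PORT A =====
-- literal port of A: nested loops over all pairs of facts; inferred is a Python set
def temporal_composition_rule (facts : List (String × String × String × String)) : List (String × String × String × String) :=
  facts.foldl (fun inferred f1 =>
    facts.foldl (fun inferred f2 =>
      if f1.2.2.1 = f2.1 ∧ f1.2.2.2 = f2.2.2.2 then
        PySem.Set.add inferred (f1.1, f1.2.1 ++ "∘" ++ f2.2.1, f2.2.2.1, f1.2.2.2)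
      else inferred) inferred) PySem.Set.empty

-- ===== PORT B =====
-- index.setdefault((s2, t2), []).append((p2, o2))  ==  modify with default [] appending
def pvIndex (facts : List (String × String × String × String)) :
    PySem.Dict (String × String) (List (String × String)) :=
  facts.foldl (fun d f => d.modify (f.1, f.2.2.2) [] (· ++ [(f.2.1, f.2.2.1)])) PySem.Dict.empty

def temporal_composition_rule_alt (facts : List (String × String × String × String)) : List (String × String × String × String) :=
  let index := pvIndex facts
  facts.foldl (fun inferred f1 =>
    (index.getD (f1.2.2.1, f1.2.2.2) []).foldl (fun inferred po =>
      PySem.Set.add inferred (f1.1, f1.2.1 ++ "∘" ++ po.1, po.2, f1.2.2.2)) inferred) PySem.Set.empty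

-- ===== PRECONDITION & SPEC =====
def Spec_temporal_composition_rule (facts : List (String × String × String × String)) (out : List (String × String × String × String)) : Prop := out = temporal_composition_rule_alt facts
instance (facts : List (String × String × String × String)) (out : List (String × String × String × String)) : Decidable (Spec_temporal_composition_rule facts out) := by unfold Spec_temporal_composition_rule; infer_instance

-- ===== CLAIM (what is proved, stated in full; the proofs are below) =====
def Claim_equal_temporal_composition_rule : Prop := ∀ (facts : List (String × String × String × String)), Dom_temporal_composition_rule facts → Spec_temporal_composition_rule facts (temporal_composition_rule facts)

-- ===== LEMMAS AND PROOFS =====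

-- the index lookup returns exactly the matching facts, in order, projected to (p, o)
theorem pvIndex_getD (facts : List (String × String × String × String)) (k : String × String) :
    (pvIndex facts).getD k []
      = (facts.filter (fun f => (f.1, f.2.2.2) == k)).map (fun f => (f.2.1, f.2.2.1)) := by
  have h := PySem.Dict.getD_foldl_modify_append
      (l := facts.map (fun f => ((f.1, f.2.2.2), (f.2.1, f.2.2.1)))) (d := PySem.Dict.empty) (c := k)
  simp only [List.foldl_map, List.filter_map, List.map_map, PySem.Dict.getD_empty,
    List.nil_append] at h
  unfold pvIndex
  exact h

-- pointwise-equal step functions fold alike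
theorem pv_foldl_congr {α β : Type} (f g : β → α → β) (l : List α) (b : β)
    (h : ∀ a ∈ l, ∀ x, f x a = g x a) : l.foldl f b = l.foldl g b := by
  induction l generalizing b with
  | nil => rfl
  | cons a t ih => simp only [List.foldl_cons, h a (by simp)]
                   exact ih _ (fun a' ha' x => h a' (by simp [ha']) x)

-- A's filtered inner loop over all facts equals a plain fold over the matching facts
theorem inner_eq (facts : List (String × String × String × String))
    (f1 : String × String × String × String) (acc : List (String × String × String × String)) :
    facts.foldl (fun inferred f2 =>
      if f1.2.2.1 = f2.1 ∧ f1.2.2.2 = f2.2.2.2 then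
        PySem.Set.add inferred (f1.1, f1.2.1 ++ "∘" ++ f2.2.1, f2.2.2.1, f1.2.2.2)
      else inferred) acc
    = ((pvIndex facts).getD (f1.2.2.1, f1.2.2.2) []).foldl (fun inferred po =>
        PySem.Set.add inferred (f1.1, f1.2.1 ++ "∘" ++ po.1, po.2, f1.2.2.2)) acc := by
  rw [pvIndex_getD, List.foldl_map]
  induction facts generalizing acc with
  | nil => rfl
  | cons f2 rest ih =>
    by_cases h : f1.2.2.1 = f2.1 ∧ f1.2.2.2 = f2.2.2.2
    · have hb : ((f2.1, f2.2.2.2) == (f1.2.2.1, f1.2.2.2)) = true := by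
        obtain ⟨h1, h2⟩ := h
        simp [h1, h2]
      simp only [List.foldl_cons, List.filter_cons, hb, if_pos h, if_pos trivial]
      exact ih _
    · have hb : ((f2.1, f2.2.2.2) == (f1.2.2.1, f1.2.2.2)) = false := by
        rw [beq_eq_false_iff_ne]
        intro heq
        exact h ⟨congrArg Prod.fst heq |>.symm, congrArg Prod.snd heq |>.symm⟩
      simp only [List.foldl_cons, List.filter_cons, hb, if_neg h]
      exact ih _

-- ===== VERDICT (by name: the statement is the Claim_ definition above) =====
theorem temporal_composition_rule_spec : Claim_equal_temporal_composition_rule := by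
  intro facts _
  unfold Spec_temporal_composition_rule temporal_composition_rule temporal_composition_rule_alt
  exact pv_foldl_congr _ _ facts _ (fun f1 _ acc => inner_eq facts f1 acc)
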